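-- pv_equiv track=rewrite | github.com/mancbg/AlgorithmicProblemSolving | CulturalProgramme.py | cultural_programme
-- ===== SOURCE A (Python) =====
-- def cultural_programme(entry_records, exit_records):
--     max_audience = 0
--     current_audience = 0
--
--     total_records = sorted(entry_records.union(exit_records))
--
--     for current_time in total_records:
--         if current_time in entry_records:
--             current_audience += 1
--         else:
--             current_audience -= 1
--         max_audience = max(max_audience, current_audience)
--
--     return max_audience
-- ===== SOURCE B (Python) =====
-- def cultural_programme(entry_records, exit_records):
--     # The running audience count right after an entry at time e equals
--     # (# entry times <= e) - (# exit-only times <= e), and the sweep maximum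
--     # is always attained right after some entry; so compute that count
--     # directly for every entry time and take the largest (no sorting, no sweep).
--     best = 0
--     for e in entry_records:
--         inside = 0
--         for x in entry_records:
--             if x <= e:
--                 inside += 1
--         for y in exit_records:
--             if y <= e and y not in entry_records:
--                 inside -= 1
--         if inside > best:
--             best = inside
--     return best
-- ===== Notes on version B (the rewrite author's own statement) =====
-- stated objective: alternative
-- what changed: B drops A's sort-and-sweep entirely: instead of sorting the union and running a +1/-1 counter, it evaluates the audience level directly at each entry time as (# entries <= e) - (# exit-only times <= e) by plain counting loops and returns the largest such value (the sweep maximum is always attained right after an entry, so this equals A's answer).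
import Mathlib
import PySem

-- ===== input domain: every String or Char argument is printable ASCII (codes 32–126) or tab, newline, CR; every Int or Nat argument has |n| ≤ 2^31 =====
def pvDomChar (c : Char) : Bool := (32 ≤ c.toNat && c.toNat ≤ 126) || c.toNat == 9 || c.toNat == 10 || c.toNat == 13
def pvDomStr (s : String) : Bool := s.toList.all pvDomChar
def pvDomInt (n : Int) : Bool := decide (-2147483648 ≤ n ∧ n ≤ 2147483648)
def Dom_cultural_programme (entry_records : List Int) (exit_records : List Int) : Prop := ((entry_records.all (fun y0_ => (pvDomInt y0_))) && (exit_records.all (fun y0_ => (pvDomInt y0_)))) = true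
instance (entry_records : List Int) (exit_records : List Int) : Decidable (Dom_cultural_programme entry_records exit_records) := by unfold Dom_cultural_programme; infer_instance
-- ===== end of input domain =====

-- B drops A's sort-and-sweep: it evaluates the audience level directly at each entry time
-- by two counting loops and returns the largest such value (objective: alternative).

-- ===== PORT A =====
-- A's loop over sorted(entry ∪ exit), +1 on entry membership, -1 otherwise, tracking the max
def cpLoopA (p : Int → Bool) (total : List Int) : Int × Int :=
  total.foldl (fun (st : Int × Int) t =>
    let cur := if p t then st.2 + 1 else st.2 - 1
    (max st.1 cur, cur)) (0, 0)

def cultural_programme (entry_records : List Int) (exit_records : List Int) : Int :=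
  let total := PySem.List.sorted
    (PySem.Set.union (PySem.Set.ofList entry_records) (PySem.Set.ofList exit_records))
    (fun x => x)
  (cpLoopA (fun t => entry_records.contains t) total).1

-- ===== PORT B =====
-- B's two inner counting loops for one candidate entry time e
def cpInside (es xs : List Int) (entry_records : List Int) (e : Int) : Int :=
  let c := es.foldl (fun inside x => if x ≤ e then inside + 1 else inside) 0
  xs.foldl (fun inside y => if y ≤ e ∧ y ∉ entry_records then inside - 1 else inside) c

-- B's outer loop over the entry set, keeping the best value seen
def cultural_programme_alt (entry_records : List Int) (exit_records : List Int) : Int :=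
  let es := PySem.Set.ofList entry_records
  let xs := PySem.Set.ofList exit_records
  es.foldl (fun best e =>
    let inside := cpInside es xs entry_records e
    if inside > best then inside else best) 0

-- ===== PRECONDITION & SPEC =====
def Spec_cultural_programme (entry_records : List Int) (exit_records : List Int) (out : Int) : Prop := out = cultural_programme_alt entry_records exit_records
instance (entry_records : List Int) (exit_records : List Int) (out : Int) : Decidable (Spec_cultural_programme entry_records exit_records out) := by unfold Spec_cultural_programme; infer_instance

-- ===== CLAIM (what is proved, stated in full; the proofs are below) =====
def Claim_equal_cultural_programme : Prop := ∀ (entry_records : List Int) (exit_records : List Int), Dom_cultural_programme entry_records exit_records → Spec_cultural_programme entry_records exit_records (cultural_programme entry_records exit_records)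

-- ===== LEMMAS AND PROOFS =====

-- signed count (+1 per entry time, -1 per other time) of a list, A's counter increment
def pvS (p : Int → Bool) : List Int → Int
  | [] => 0
  | u :: us => (if p u then 1 else -1) + pvS p us

theorem pvS_append (p : Int → Bool) (l l' : List Int) :
    pvS p (l ++ l') = pvS p l + pvS p l' := by
  induction l with
  | nil => simp [pvS]
  | cons u us ih => simp [pvS, ih]; ring

theorem pvS_eq_counts (p : Int → Bool) (l : List Int) :
    pvS p l = ((l.filter p).length : Int) - ((l.filter (fun u => !p u)).length : Int) := by
  induction l with
  | nil => simp [pvS]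
  | cons u us ih =>
    by_cases hp : p u <;> simp [pvS, hp, ih] <;> push_cast <;> ring

-- A's sweep keeps its max ≥ its current counter and ≥ 0
theorem cpLoopA_inv (p : Int → Bool) (l : List Int) :
    ∀ st : Int × Int, st.2 ≤ st.1 → 0 ≤ st.1 →
      (l.foldl (fun (st : Int × Int) t =>
        let cur := if p t then st.2 + 1 else st.2 - 1
        (max st.1 cur, cur)) st).2 ≤
      (l.foldl (fun (st : Int × Int) t =>
        let cur := if p t then st.2 + 1 else st.2 - 1
        (max st.1 cur, cur)) st).1 ∧
      0 ≤ (l.foldl (fun (st : Int × Int) t =>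
        let cur := if p t then st.2 + 1 else st.2 - 1
        (max st.1 cur, cur)) st).1 := by
  induction l with
  | nil => intro st h1 h2; exact ⟨h1, h2⟩
  | cons t ts ih =>
    intro st h1 h2
    simp only [List.foldl_cons]
    exact ih _ (le_max_right _ _) (le_trans h2 (le_max_left _ _))

-- characterisation of A's sweep on a strictly increasing list:
-- the final max is the max over entry elements of the signed prefix count
theorem cpLoopA_char (p : Int → Bool) (v : Int → Int) :
    ∀ l : List Int, l.Pairwise (· < ·) →
      (∀ e ∈ l, v e = pvS p (l.filter (fun u => decide (u ≤ e)))) →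
      cpLoopA p l = (l.foldl (fun b e => if p e then max b (v e) else b) 0, pvS p l) := by
  intro l
  induction l using List.reverseRecOn with
  | nil => intro _ _; rfl
  | append_singleton l t ih =>
    intro hpw hv
    rw [List.pairwise_append] at hpw
    obtain ⟨hl, -, hlt⟩ := hpw
    have hlt' : ∀ a ∈ l, a < t := fun a ha => hlt a ha t (by simp)
    have hv' : ∀ e ∈ l, v e = pvS p (l.filter (fun u => decide (u ≤ e))) := by
      intro e he
      have := hv e (by simp [he])
      have hte : ¬ t ≤ e := not_le.mpr (hlt' e he)
      rwa [List.filter_append, show List.filter (fun u => decide (u ≤ e)) [t] = [] by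
        simp [List.filter_cons, hte], List.append_nil] at this
    have hih := ih hl hv'
    have hinv : (cpLoopA p l).2 ≤ (cpLoopA p l).1 ∧ 0 ≤ (cpLoopA p l).1 := by
      unfold cpLoopA; exact cpLoopA_inv p l (0, 0) (le_refl 0) (le_refl 0)
    rw [hih] at hinv
    unfold cpLoopA at hih ⊢
    rw [List.foldl_append, List.foldl_append, hih]
    simp only [List.foldl_cons, List.foldl_nil]
    have hS : pvS p (l ++ [t]) = pvS p l + (if p t then 1 else -1) := by
      rw [pvS_append]; simp [pvS]
    by_cases hp : p t
    · have hvt : v t = pvS p l + 1 := by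
        have hft : List.filter (fun u => decide (u ≤ t)) (l ++ [t]) = l ++ [t] := by
          rw [List.filter_eq_self]
          intro a ha
          rcases List.mem_append.1 ha with ha | ha
          · exact decide_eq_true (le_of_lt (hlt' a ha))
          · simp at ha; simp [ha]
        rw [hv t (by simp), hft, pvS_append]
        simp [pvS, hp]
      simp only [hp, if_true, hS, hvt]
    · simp only [hp, if_false, Bool.false_eq_true, hS]
      have : max (l.foldl (fun b e => if p e then max b (v e) else b) 0) (pvS p l - 1)
          = l.foldl (fun b e => if p e then max b (v e) else b) 0 := by
        apply max_eq_left; omega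
      simp only [this, Prod.mk.injEq, eq_self_iff_true, true_and]
      omega

-- two nodup lists with the same members have the same length
theorem length_eq_of_nodup_mem (l1 l2 : List Int) (h1 : l1.Nodup) (h2 : l2.Nodup)
    (h : ∀ x, x ∈ l1 ↔ x ∈ l2) : l1.length = l2.length :=
  ((List.perm_ext_iff_of_nodup h1 h2).2 h).length_eq

-- B's first inner loop counts the elements ≤ e
theorem foldl_count_le (e : Int) (l : List Int) :
    ∀ c : Int, l.foldl (fun inside x => if x ≤ e then inside + 1 else inside) c
      = c + ((l.filter (fun x => decide (x ≤ e))).length : Int) := by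
  induction l with
  | nil => intro c; simp
  | cons x xsl ih =>
    intro c
    by_cases hx : x ≤ e <;> simp [hx, ih] <;> push_cast <;> ring

-- B's second inner loop subtracts the count of matching elements
theorem foldl_count_sub (q : Int → Prop) [DecidablePred q] (l : List Int) :
    ∀ c : Int, l.foldl (fun inside y => if q y then inside - 1 else inside) c
      = c - ((l.filter (fun y => decide (q y))).length : Int) := by
  induction l with
  | nil => intro c; simp
  | cons y ysl ih =>
    intro c
    by_cases hy : q y <;> simp [hy, ih] <;> push_cast <;> ring

theorem cpInside_eq (es xs entry : List Int) (e : Int) :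
    cpInside es xs entry e
      = ((es.filter (fun x => decide (x ≤ e))).length : Int)
        - ((xs.filter (fun y => decide (y ≤ e ∧ y ∉ entry))).length : Int) := by
  unfold cpInside
  rw [foldl_count_sub (fun y => y ≤ e ∧ y ∉ entry), foldl_count_le]
  omega

theorem cultural_programme_spec : Claim_equal_cultural_programme := by
  intro entry exit _hdom
  unfold Spec_cultural_programme cultural_programme cultural_programme_alt
  set U := PySem.Set.union (PySem.Set.ofList entry) (PySem.Set.ofList exit) with hU
  set l := PySem.List.sorted U (fun x => x) with hldef
  set es := PySem.Set.ofList entry with hes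
  set xs := PySem.Set.ofList exit with hxs
  have hUnd : U.Nodup := PySem.Set.nodup_union _ _ (PySem.Set.nodup_ofList entry)
  have hl_pw : l.Pairwise (· < ·) := by
    rw [hldef, show U = PySem.Set.ofList U from (PySem.Set.ofList_eq_self_of_nodup U hUnd).symm]
    exact PySem.List.sorted_ofList_pairwise_lt U
  have hl_nd : l.Nodup := hl_pw.imp (fun h => ne_of_lt h)
  have hl_mem : ∀ u : Int, u ∈ l ↔ u ∈ entry ∨ u ∈ exit := by
    intro u
    rw [hldef, PySem.List.mem_sorted, hU, PySem.Set.mem_union,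
      PySem.Set.mem_ofList, PySem.Set.mem_ofList]
  have hes_nd : es.Nodup := PySem.Set.nodup_ofList entry
  have hxs_mem : ∀ u : Int, u ∈ xs ↔ u ∈ exit := fun u => PySem.Set.mem_ofList exit u
  have hes_mem : ∀ u : Int, u ∈ es ↔ u ∈ entry := fun u => PySem.Set.mem_ofList entry u
  set p : Int → Bool := fun t => entry.contains t with hp
  have hp_iff : ∀ u : Int, p u = true ↔ u ∈ entry := by intro u; simp [hp]
  set v : Int → Int := fun e => pvS p (l.filter (fun u => decide (u ≤ e))) with hv
  -- A's side: the sweep max as a fold of prefix counts over the entry elements of l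
  show (cpLoopA p l).1
      = es.foldl (fun best e =>
          if cpInside es xs entry e > best then cpInside es xs entry e else best) 0
  rw [cpLoopA_char p v l hl_pw (fun e _ => rfl)]
  simp only
  -- restrict A's fold to the entry elements, as a fold over l.filter p
  have hAfold : l.foldl (fun b e => if p e then max b (v e) else b) 0
      = (l.filter p).foldl (fun b e => max b (v e)) 0 := by
    rw [List.foldl_filter]
  rw [hAfold]
  -- l.filter p is a permutation of es
  have hperm : (l.filter p).Perm es := by
    rw [List.perm_ext_iff_of_nodup (hl_nd.filter p) hes_nd]
    intro u
    rw [List.mem_filter, hes_mem, hl_mem, hp_iff]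
    tauto
  -- max-folding is insensitive to the order of the list
  have hfold_perm : (l.filter p).foldl (fun b e => max b (v e)) 0
      = es.foldl (fun b e => max b (v e)) 0 := by
    apply hperm.foldl_eq'
    intro a _ b _ z
    rw [max_right_comm]
  rw [hfold_perm]
  -- pointwise: B's inside equals the signed prefix count v
  apply PySem.List.foldl_congr_mem
  intro acc e _
  have hcount1 : ((l.filter (fun u => decide (u ≤ e))).filter p).length
      = (es.filter (fun x => decide (x ≤ e))).length := by
    apply length_eq_of_nodup_mem _ _ ((hl_nd.filter _).filter _) (hes_nd.filter _)
    intro u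
    simp only [List.mem_filter, hl_mem, hes_mem, hp_iff, decide_eq_true_eq]
    tauto
  have hcount2 : ((l.filter (fun u => decide (u ≤ e))).filter (fun u => !p u)).length
      = (xs.filter (fun y => decide (y ≤ e ∧ y ∉ entry))).length := by
    apply length_eq_of_nodup_mem _ _ ((hl_nd.filter _).filter _)
      ((PySem.Set.nodup_ofList exit).filter _)
    intro u
    simp only [List.mem_filter, hl_mem, PySem.Set.mem_ofList, decide_eq_true_eq,
      Bool.not_eq_eq_eq_not, Bool.not_true]
    constructor
    · rintro ⟨⟨hu, hle⟩, hnp⟩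
      have hne : u ∉ entry := by
        intro hmem; rw [← hp_iff] at hmem; simp [hmem] at hnp
      exact ⟨hu.resolve_left hne, hle, hne⟩
    · rintro ⟨hu, hle, hne⟩
      refine ⟨⟨Or.inr hu, hle⟩, ?_⟩
      by_cases hpu : p u = true
      · exact absurd ((hp_iff u).1 hpu) hne
      · simpa using hpu
  have hveq : cpInside es xs entry e = v e := by
    rw [cpInside_eq, hv]
    simp only [pvS_eq_counts, hcount1, hcount2]
  simp only [hveq]
  omega

-- ===== VERDICT =====
-- (the verdict theorem cultural_programme_spec is proved above)
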